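-- pv_equiv track=rewrite | github.com/ffelsen/elab_app | inputparsing.py | convert_time_units
-- ===== SOURCE A (Python) =====
-- DAY_MICROS = 24*60*60*1000*1000
--
-- HOUR_MICROS = 60*60*1000*1000
--
-- MIN_MICROS = 60*1000*1000
--
-- SEC_MICROS = 1000*1000
--
-- def convert_time_units(numb,s_unit,t_time):
--     convert_micros = { "d":DAY_MICROS, "h":HOUR_MICROS, "min":MIN_MICROS, "s":SEC_MICROS, "ms":1000, "us":1}
--     s_units = s_unit.replace('µ','u')
--     if s_units in convert_micros:
--         dt_micros = numb*convert_micros[s_units]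
--         for key in convert_micros:
--             dt_i = dt_micros//convert_micros[key]
--             t_time[key] += dt_i
--             dt_micros -= dt_i*convert_micros[key]
--     return t_time
-- ===== SOURCE B (Python) =====
-- DAY_MICROS = 24*60*60*1000*1000
--
-- HOUR_MICROS = 60*60*1000*1000
--
-- MIN_MICROS = 60*1000*1000
--
-- SEC_MICROS = 1000*1000
--
-- def convert_time_units(numb, s_unit, t_time):
--     table = {"d": DAY_MICROS, "h": HOUR_MICROS, "min": MIN_MICROS,
--              "s": SEC_MICROS, "ms": 1000, "us": 1}
--     s_units = s_unit.replace('µ', 'u')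
--     if s_units in table:
--         # bottom-up mixed-radix digit extraction: peel digits with divmod by
--         # the small radices, smallest unit first; the final quotient is days
--         rem = numb * table[s_units]
--         digits = []
--         for key, radix in (("us", 1000), ("ms", 1000), ("s", 60), ("min", 60), ("h", 24)):
--             rem, digit = divmod(rem, radix)
--             digits.append((key, digit))
--         digits.append(("d", rem))
--         for key, digit in reversed(digits):
--             t_time[key] += digit
--     return t_time
-- ===== Notes on version B (the rewrite author's own statement) =====
-- stated objective: alternative
-- what changed: Replaces the top-down shrinking-remainder division by precomputed cumulative microsecond factors with bottom-up mixed-radix digit extraction: a divmod chain by the small radices (1000,1000,60,60,24) builds a digits list smallest-unit-first in one staged pass, then a second pass applies the digits to t_time.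
import Mathlib
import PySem

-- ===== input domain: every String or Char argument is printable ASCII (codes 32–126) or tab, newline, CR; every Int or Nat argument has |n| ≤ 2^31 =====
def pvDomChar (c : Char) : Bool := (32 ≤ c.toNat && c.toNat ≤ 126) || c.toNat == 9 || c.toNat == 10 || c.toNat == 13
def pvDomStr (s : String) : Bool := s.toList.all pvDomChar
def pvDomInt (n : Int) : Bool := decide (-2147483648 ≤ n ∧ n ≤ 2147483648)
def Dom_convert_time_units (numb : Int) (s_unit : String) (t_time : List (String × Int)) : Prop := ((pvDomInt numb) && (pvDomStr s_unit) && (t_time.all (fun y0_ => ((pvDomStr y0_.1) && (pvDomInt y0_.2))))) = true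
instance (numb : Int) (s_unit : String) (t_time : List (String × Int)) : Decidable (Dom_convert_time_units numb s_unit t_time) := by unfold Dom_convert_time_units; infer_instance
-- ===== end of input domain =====

-- B replaces A's top-down shrinking-remainder division by cumulative microsecond factors
-- with bottom-up mixed-radix digit extraction (a divmod chain by 1000,1000,60,60,24
-- building a digits list, then a second pass applying it); alternative decomposition,
-- no speed claim. Both Pythons mutate t_time in place; the equivalence is about the
-- returned value (the mutations coincide wherever A returns).

-- the unit table, in A's iteration order
def pvUnits : List (String × Int) :=
  [("d", 86400000000), ("h", 3600000000), ("min", 60000000), ("s", 1000000), ("ms", 1000), ("us", 1)]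

-- t_time[key] += dt on the assoc list (first match; Pre_ guarantees the key is present)
def pvBump (l : List (String × Int)) (k : String) (dt : Int) : List (String × Int) :=
  match l with
  | [] => []
  | (k', v) :: rest => if k' == k then (k', v + dt) :: rest else (k', v) :: pvBump rest k dt

-- ===== PORT A =====
def convert_time_units (numb : Int) (s_unit : String) (t_time : List (String × Int)) : List (String × Int) :=
  let s_units := PySem.Str.replace s_unit "µ" "u"
  match (pvUnits.find? (fun kv => kv.1 == s_units)).map (·.2) with
  | none => t_time
  | some c =>
    (pvUnits.foldl (fun (st : Int × List (String × Int)) kv =>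
        let dt_i := PySem.Int.floordiv st.1 kv.2
        (st.1 - dt_i * kv.2, pvBump st.2 kv.1 dt_i)) (numb * c, t_time)).2

-- ===== PORT B =====
-- the small radix chain, smallest unit first (B's iteration order)
def pvRadixes : List (String × Int) :=
  [("us", 1000), ("ms", 1000), ("s", 60), ("min", 60), ("h", 24)]

def convert_time_units_alt (numb : Int) (s_unit : String) (t_time : List (String × Int)) : List (String × Int) :=
  let s_units := PySem.Str.replace s_unit "µ" "u"
  match (pvUnits.find? (fun kv => kv.1 == s_units)).map (·.2) with
  | none => t_time
  | some c =>
    -- first pass: divmod chain peeling digits smallest-unit-first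
    let p := pvRadixes.foldl (fun (st : Int × List (String × Int)) kv =>
        (PySem.Int.floordiv st.1 kv.2, st.2 ++ [(kv.1, PySem.Int.mod st.1 kv.2)])) (numb * c, [])
    let digits := p.2 ++ [("d", p.1)]
    -- second pass: apply the digits (largest unit first) to t_time
    digits.reverse.foldl (fun tt kd => pvBump tt kd.1 kd.2) t_time

-- ===== PRECONDITION & SPEC =====
-- Pre_ excludes exactly the inputs where Python A raises KeyError: a recognised source
-- unit but one of the six bucket keys missing from t_time.
def Pre_convert_time_units (numb : Int) (s_unit : String) (t_time : List (String × Int)) : Prop :=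
  (pvUnits.find? (fun kv => kv.1 == PySem.Str.replace s_unit "µ" "u")).isSome →
    ∀ kv ∈ pvUnits, kv.1 ∈ t_time.map Prod.fst
instance (numb : Int) (s_unit : String) (t_time : List (String × Int)) : Decidable (Pre_convert_time_units numb s_unit t_time) := by unfold Pre_convert_time_units; infer_instance

def pvWitness_convert_time_units : Int × String × (List (String × Int)) :=
  (5, "min", [("d", 0), ("h", 1), ("min", 0), ("s", 2), ("ms", 0), ("us", 0)])

def Spec_convert_time_units (numb : Int) (s_unit : String) (t_time : List (String × Int)) (out : List (String × Int)) : Prop := out = convert_time_units_alt numb s_unit t_time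
instance (numb : Int) (s_unit : String) (t_time : List (String × Int)) (out : List (String × Int)) : Decidable (Spec_convert_time_units numb s_unit t_time out) := by unfold Spec_convert_time_units; infer_instance

-- ===== CLAIM (what is proved, stated in full; the proofs are below) =====
def Claim_equal_convert_time_units : Prop := ∀ (numb : Int) (s_unit : String) (t_time : List (String × Int)), Dom_convert_time_units numb s_unit t_time → Pre_convert_time_units numb s_unit t_time → Spec_convert_time_units numb s_unit t_time (convert_time_units numb s_unit t_time)

-- ===== LEMMAS AND PROOFS =====

-- remainder after a division step: t - (t//m)*m = t % m (0 < m)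
theorem pv_rem_eq_mod (t m : Int) (hm : 0 < m) :
    t - PySem.Int.floordiv t m * m = PySem.Int.mod t m := by
  rw [PySem.Int.floordiv_eq_ediv_of_pos hm, PySem.Int.mod_eq_emod_of_pos hm,
    Int.emod_def]; ring

-- per-bucket extraction: (t % (k*h)) // h = (t // h) % k  (0 < h, 0 < k)
theorem pv_extract (t h k : Int) (hh : 0 < h) (hk : 0 < k) :
    PySem.Int.floordiv (PySem.Int.mod t (k * h)) h =
      PySem.Int.mod (PySem.Int.floordiv t h) k := by
  rw [PySem.Int.floordiv_eq_ediv_of_pos hh,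
    PySem.Int.mod_eq_emod_of_pos (by positivity : (0:Int) < k * h),
    PySem.Int.floordiv_eq_ediv_of_pos hh, PySem.Int.mod_eq_emod_of_pos hk]
  rw [Int.emod_def, Int.emod_def]
  have h1 : t - k * h * (t / (k * h)) = t + (-(k * (t / (k * h)))) * h := by ring
  rw [h1, Int.add_mul_ediv_right _ _ (by omega : h ≠ 0)]
  rw [Int.ediv_ediv_of_nonneg (le_of_lt hh), mul_comm h k]
  ring

-- nested remainders collapse: (t % a) % b = t % b when b ∣ a (0 < a, 0 < b)
theorem pv_mod_mod (t a b : Int) (ha : 0 < a) (hb : 0 < b) (hd : b ∣ a) :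
    PySem.Int.mod (PySem.Int.mod t a) b = PySem.Int.mod t b := by
  rw [PySem.Int.mod_eq_emod_of_pos ha, PySem.Int.mod_eq_emod_of_pos hb,
    PySem.Int.mod_eq_emod_of_pos hb, Int.emod_emod_of_dvd _ hd]

-- floor divisions compose: (t // a) // b = t // (a*b) (0 < a, 0 < b)
theorem pv_div_div (t a b : Int) (ha : 0 < a) (hb : 0 < b) :
    PySem.Int.floordiv (PySem.Int.floordiv t a) b = PySem.Int.floordiv t (a * b) := by
  rw [PySem.Int.floordiv_eq_ediv_of_pos ha, PySem.Int.floordiv_eq_ediv_of_pos hb,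
    PySem.Int.floordiv_eq_ediv_of_pos (by positivity : (0:Int) < a * b),
    Int.ediv_ediv_of_nonneg (le_of_lt ha)]

theorem pv_div_one (t : Int) : PySem.Int.floordiv t 1 = t := by
  rw [PySem.Int.floordiv_eq_ediv_of_pos (by norm_num : (0:Int) < 1), Int.ediv_one]

-- ===== VERDICT =====
theorem convert_time_units_spec : Claim_equal_convert_time_units := by
  intro numb s_unit t_time _dom _pre
  unfold Spec_convert_time_units convert_time_units convert_time_units_alt
  cases hf : (pvUnits.find? (fun kv => kv.1 == PySem.Str.replace s_unit "µ" "u")).map (·.2) with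
  | none => simp only [hf]
  | some c =>
    simp only [hf]
    generalize numb * c = t
    simp only [pvUnits, pvRadixes, List.foldl, List.reverse, List.reverseAux,
      List.append_nil, List.nil_append, List.cons_append]
    -- normalise A's shrinking remainders to mods
    rw [pv_rem_eq_mod t 86400000000 (by norm_num)]
    rw [pv_rem_eq_mod _ 3600000000 (by norm_num)]
    rw [pv_rem_eq_mod _ 60000000 (by norm_num)]
    rw [pv_rem_eq_mod _ 1000000 (by norm_num)]
    rw [pv_rem_eq_mod _ 1000 (by norm_num)]
    rw [pv_mod_mod t 86400000000 3600000000 (by norm_num) (by norm_num) (by norm_num)]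
    rw [pv_mod_mod t 3600000000 60000000 (by norm_num) (by norm_num) (by norm_num)]
    rw [pv_mod_mod t 60000000 1000000 (by norm_num) (by norm_num) (by norm_num)]
    rw [pv_mod_mod t 1000000 1000 (by norm_num) (by norm_num) (by norm_num)]
    -- A's bucket values as (t // factor) % cap
    have hA2 : PySem.Int.floordiv (PySem.Int.mod t 86400000000) 3600000000 = PySem.Int.mod (PySem.Int.floordiv t 3600000000) 24 := by
      have h := pv_extract t 3600000000 24 (by norm_num) (by norm_num)
      rwa [show ((24:Int) * 3600000000) = 86400000000 by norm_num] at h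
    have hA3 : PySem.Int.floordiv (PySem.Int.mod t 3600000000) 60000000 = PySem.Int.mod (PySem.Int.floordiv t 60000000) 60 := by
      have h := pv_extract t 60000000 60 (by norm_num) (by norm_num)
      rwa [show ((60:Int) * 60000000) = 3600000000 by norm_num] at h
    have hA4 : PySem.Int.floordiv (PySem.Int.mod t 60000000) 1000000 = PySem.Int.mod (PySem.Int.floordiv t 1000000) 60 := by
      have h := pv_extract t 1000000 60 (by norm_num) (by norm_num)
      rwa [show ((60:Int) * 1000000) = 60000000 by norm_num] at h
    have hA5 : PySem.Int.floordiv (PySem.Int.mod t 1000000) 1000 = PySem.Int.mod (PySem.Int.floordiv t 1000) 1000 := by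
      have h := pv_extract t 1000 1000 (by norm_num) (by norm_num)
      rwa [show ((1000:Int) * 1000) = 1000000 by norm_num] at h
    have hA6 : PySem.Int.floordiv (PySem.Int.mod t 1000) 1 = PySem.Int.mod t 1000 := by
      rw [pv_div_one]
    rw [hA2, hA3, hA4, hA5, hA6]
    -- normalise B's divmod chain quotients to t // factor
    rw [pv_div_div t 1000 1000 (by norm_num) (by norm_num)]
    rw [show ((1000:Int) * 1000) = 1000000 by norm_num]
    rw [pv_div_div t 1000000 60 (by norm_num) (by norm_num)]
    rw [show ((1000000:Int) * 60) = 60000000 by norm_num]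
    rw [pv_div_div t 60000000 60 (by norm_num) (by norm_num)]
    rw [show ((60000000:Int) * 60) = 3600000000 by norm_num]
    rw [pv_div_div t 3600000000 24 (by norm_num) (by norm_num)]
    rw [show ((3600000000:Int) * 24) = 86400000000 by norm_num]
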